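-- pv_equiv track=rewrite | github.com/clairexen/LawAT | code/RisEnQuery.py | foldSoftPreserve
-- ===== SOURCE A (Python) =====
-- def foldSoftPreserve(s, width=80):
--     out, start, last_space = [], 0, -1
--     for i, c in enumerate(s):
--         if c == ' ': last_space = i
--         if i - start >= width:
--             if last_space > start:
--                 out.append(s[start:last_space + 1])
--                 start = last_space + 1
--             else:
--                 out.append(s[start:i])
--                 start = i
--             last_space = -1
--     if start < len(s):
--         out.append(s[start:])
--     return out
-- ===== SOURCE B (Python) =====
-- def foldSoftPreserve(s, width=80):
--     if width < 1:
--         raise ValueError("width must be at least 1")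
--     out, start = [], 0
--     while start + width < len(s):
--         j = s.rfind(' ', start, start + width + 1)
--         if j > start:
--             out.append(s[start:j + 1])
--             start = j + 1
--         else:
--             out.append(s[start:start + width])
--             start += width
--     if start < len(s):
--         out.append(s[start:])
--     return out
-- ===== Notes on version B (the rewrite author's own statement) =====
-- stated objective: alternative
-- what changed: A's single-pass per-character state machine (tracking start/last_space incrementally) is replaced by a per-line while loop that finds each break point with one str.rfind over the current window; Pre_ excludes non-positive width, where A returns a run of degenerate fragments while B, like textwrap, raises ValueError.
-- outside the precondition, e.g. on foldSoftPreserve('ab', 0): A returns ['', 'a', 'b'], B raises ValueError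
import Mathlib
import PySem

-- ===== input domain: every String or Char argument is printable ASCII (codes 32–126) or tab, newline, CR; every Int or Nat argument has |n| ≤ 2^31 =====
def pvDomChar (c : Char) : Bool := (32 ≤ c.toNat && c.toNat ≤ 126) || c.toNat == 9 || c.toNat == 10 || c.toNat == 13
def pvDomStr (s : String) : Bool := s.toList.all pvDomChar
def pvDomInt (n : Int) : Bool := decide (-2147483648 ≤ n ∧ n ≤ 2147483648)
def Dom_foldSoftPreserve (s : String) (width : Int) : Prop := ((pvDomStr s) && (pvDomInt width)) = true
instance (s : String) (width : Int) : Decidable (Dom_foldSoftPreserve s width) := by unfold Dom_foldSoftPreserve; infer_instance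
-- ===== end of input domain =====

-- B replaces A's per-character state machine by a per-line while loop that finds each
-- break with one str.rfind over the current window; an alternative decomposition.

-- ===== PORT A =====
def foldSoftPreserveLoop (s : String) (width : Int) :
    List (Int × Char) → List String × Int × Int → List String × Int × Int
  | [], st => st
  | (i, c) :: rest, (out, start, last_space) =>
    let ls : Int := if c = ' ' then i else last_space
    if width ≤ i - start then
      if start < ls then
        foldSoftPreserveLoop s width rest
          (out ++ [PySem.Str.slice s (some start) (some (ls + 1))], ls + 1, -1)
      else
        foldSoftPreserveLoop s width rest
          (out ++ [PySem.Str.slice s (some start) (some i)], i, -1)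
    else
      foldSoftPreserveLoop s width rest (out, start, ls)

def foldSoftPreserve (s : String) (width : Int) : List String :=
  let st := foldSoftPreserveLoop s width (PySem.List.enumerate s.toList) ([], 0, -1)
  if st.2.1 < PySem.Str.len s then st.1 ++ [PySem.Str.slice s (some st.2.1) none] else st.1

-- ===== PORT B =====
-- while-loop of Source B as fuel recursion; under Pre_ (width ≥ 1) start grows every turn,
-- so length+1 units of fuel are never exhausted.
def foldSoftPreserveAltLoop (s : String) (width : Int) :
    Nat → Int → List String → List String × Int
  | 0, start, out => (out, start)
  | fuel + 1, start, out =>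
    if start + width < PySem.Str.len s then
      let j := PySem.Str.rfindFrom s " " start (some (start + width + 1))
      if start < j then
        foldSoftPreserveAltLoop s width fuel (j + 1)
          (out ++ [PySem.Str.slice s (some start) (some (j + 1))])
      else
        foldSoftPreserveAltLoop s width fuel (start + width)
          (out ++ [PySem.Str.slice s (some start) (some (start + width))])
    else (out, start)

def foldSoftPreserve_alt (s : String) (width : Int) : List String :=
  if width < 1 then []  -- Source B raises ValueError here (outside Pre_)
  else
    let st := foldSoftPreserveAltLoop s width (s.toList.length + 1) 0 []
    if st.2 < PySem.Str.len s then st.1 ++ [PySem.Str.slice s (some st.2) none] else st.1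

-- ===== PRECONDITION & SPEC =====
-- Pre_ excludes non-positive width, on which A still returns (a run of degenerate
-- one-character fragments, an accident of its state machine) while B, like textwrap,
-- raises ValueError.
def Pre_foldSoftPreserve (s : String) (width : Int) : Prop := 1 ≤ width
instance (s : String) (width : Int) : Decidable (Pre_foldSoftPreserve s width) := by unfold Pre_foldSoftPreserve; infer_instance
def pvWitness_foldSoftPreserve : String × Int := ("ab cd ef", 4)
def Spec_foldSoftPreserve (s : String) (width : Int) (out : List String) : Prop := out = foldSoftPreserve_alt s width
instance (s : String) (width : Int) (out : List String) : Decidable (Spec_foldSoftPreserve s width out) := by unfold Spec_foldSoftPreserve; infer_instance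

-- ===== CLAIM (what is proved, stated in full; the proofs are below) =====
def Claim_equal_foldSoftPreserve : Prop := ∀ (s : String) (width : Int), Dom_foldSoftPreserve s width → Pre_foldSoftPreserve s width → Spec_foldSoftPreserve s width (foldSoftPreserve s width)

-- ===== LEMMAS AND PROOFS =====

-- last index m' < m with ys[m'] = ' ', else -1 (A's last_space variable, seen bottom-up)
def pvLS0 (ys : List Char) : Nat → Int
  | 0 => -1
  | m + 1 => if ys[m]? = some ' ' then (m : Int) else pvLS0 ys m

-- python rfind(' ', lo, hi) over a char list, with Nat bounds
def pvRF (cs : List Char) (lo hi : Nat) : Int :=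
  PySem.Chars.rfindFrom cs [' '] (lo : Int) (some (hi : Int))

def pvFinA (s : String) (st : List String × Int × Int) : List String :=
  if st.2.1 < PySem.Str.len s then st.1 ++ [PySem.Str.slice s (some st.2.1) none] else st.1

def pvFinB (s : String) (st : List String × Int) : List String :=
  if st.2 < PySem.Str.len s then st.1 ++ [PySem.Str.slice s (some st.2) none] else st.1

lemma pvPrefix_space (zs : List Char) : [' '] <+: zs ↔ zs[0]? = some ' ' := by
  cases zs with
  | nil => simp
  | cons a l => simp [List.cons_prefix_cons, eq_comm]

lemma pvGo_eq (ys : List Char) : ∀ (k : Nat), PySem.Chars.rfind.go ys [' '] k = pvLS0 ys (k + 1) := by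
  intro k
  induction k with
  | zero =>
    rw [PySem.Chars.rfind.go]
    simp [pvLS0, pvPrefix_space]
  | succ j ih =>
    rw [PySem.Chars.rfind.go]
    push_cast
    simp [pvLS0, pvPrefix_space, ih]

lemma pvRfind_space (ys : List Char) : PySem.Chars.rfind ys [' '] = pvLS0 ys (ys.length + 1) := by
  rw [PySem.Chars.rfind, pvGo_eq]

lemma pvLS0_bound (ys : List Char) : ∀ m, pvLS0 ys m = -1 ∨
    ∃ k : Nat, pvLS0 ys m = (k : Int) ∧ k < m ∧ k < ys.length := by
  intro m
  induction m with
  | zero => left; rfl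
  | succ m ih =>
    by_cases h : ys[m]? = some ' '
    · right
      refine ⟨m, by simp [pvLS0, h], by omega, ?_⟩
      exact (List.getElem?_eq_some_iff.mp h).1
    · rcases ih with h1 | ⟨k, hk, h2, h3⟩
      · left; simp [pvLS0, h, h1]
      · right; exact ⟨k, by simp [pvLS0, h, hk], by omega, h3⟩

lemma pvLS0_congr (xs ys : List Char) : ∀ m, (∀ k, k < m → xs[k]? = ys[k]?) →
    pvLS0 xs m = pvLS0 ys m := by
  intro m
  induction m with
  | zero => intro _; rfl
  | succ m ih =>
    intro h
    simp only [pvLS0, h m (by omega)]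
    rw [ih (fun k hk => h k (by omega))]

lemma pvRF_eq (cs : List Char) (lo hi : Nat) (h1 : lo ≤ hi) (h2 : hi ≤ cs.length) :
    pvRF cs lo hi =
      (if pvLS0 (List.drop lo (List.take hi cs)) (hi - lo + 1) = -1 then -1
       else (lo : Int) + pvLS0 (List.drop lo (List.take hi cs)) (hi - lo + 1)) := by
  have hlen : (List.drop lo (List.take hi cs)).length = hi - lo := by
    simp [List.length_drop, List.length_take]
    omega
  have hA : ¬ ((cs.length : Int) < (hi : Int)) := by omega
  have hB : ¬ ((hi : Int) < 0) := by omega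
  have hC : ¬ ((lo : Int) < 0) := by omega
  have hD : ¬ ((hi : Int) < (lo : Int)) := by omega
  unfold pvRF
  rw [PySem.Chars.rfindFrom]
  simp only [if_neg hA, if_neg hB, if_neg hC, if_neg hD, Int.toNat_natCast, pvRfind_space, hlen]

lemma pvRF_self (cs : List Char) (lo : Nat) (h : lo ≤ cs.length) : pvRF cs lo lo = -1 := by
  rw [pvRF_eq cs lo lo le_rfl h]
  simp [pvLS0]

lemma pvRF_succ (cs : List Char) (lo i : Nat) (hlo : lo ≤ i) (hn : i < cs.length) :
    pvRF cs lo (i + 1) = if cs[i]? = some ' ' then (i : Int) else pvRF cs lo i := by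
  rw [pvRF_eq cs lo (i + 1) (by omega) (by omega), pvRF_eq cs lo i hlo (by omega)]
  set ys1 := List.drop lo (List.take (i + 1) cs) with hys1
  set ys0 := List.drop lo (List.take i cs) with hys0
  have hl1 : ys1.length = i + 1 - lo := by
    simp [hys1, List.length_drop, List.length_take]; omega
  have hl0 : ys0.length = i - lo := by
    simp [hys0, List.length_drop, List.length_take]; omega
  have hidx1 : ∀ k, k < i + 1 - lo → ys1[k]? = cs[lo + k]? := by
    intro k hk
    rw [hys1, List.getElem?_drop, List.getElem?_take_of_lt (by omega)]
  have hidx0 : ∀ k, k < i - lo → ys0[k]? = cs[lo + k]? := by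
    intro k hk
    rw [hys0, List.getElem?_drop, List.getElem?_take_of_lt (by omega)]
  have e1 : i + 1 - lo + 1 = (i - lo) + 2 := by omega
  rw [e1]
  have ha : ys1[(i - lo) + 1]? = none := by
    rw [List.getElem?_eq_none_iff]; omega
  have hb : ys1[i - lo]? = cs[i]? := by
    rw [hidx1 (i - lo) (by omega)]; congr 1; omega
  have hcg : pvLS0 ys1 (i - lo) = pvLS0 ys0 (i - lo) := by
    apply pvLS0_congr
    intro k hk
    rw [hidx1 k (by omega), hidx0 k hk]
  have hc : ys0[i - lo]? = none := by
    rw [List.getElem?_eq_none_iff]; omega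
  have h2' : pvLS0 ys1 ((i - lo) + 2) =
      if cs[i]? = some ' ' then ((i - lo : Nat) : Int) else pvLS0 ys0 (i - lo) := by
    show (if ys1[(i - lo) + 1]? = some ' ' then (((i - lo) + 1 : Nat) : Int) else pvLS0 ys1 ((i - lo) + 1)) = _
    rw [ha, if_neg (by simp)]
    show (if ys1[i - lo]? = some ' ' then ((i - lo : Nat) : Int) else pvLS0 ys1 (i - lo)) = _
    rw [hb, hcg]
  have h0' : pvLS0 ys0 ((i - lo) + 1) = pvLS0 ys0 (i - lo) := by
    show (if ys0[i - lo]? = some ' ' then ((i - lo : Nat) : Int) else pvLS0 ys0 (i - lo)) = _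
    rw [hc, if_neg (by simp)]
  rw [h2', h0']
  by_cases hsp : cs[i]? = some ' '
  · simp only [if_pos hsp]
    split_ifs <;> first | tauto | omega
  · simp only [if_neg hsp]

lemma pvRF_bound (cs : List Char) (lo hi : Nat) (h1 : lo ≤ hi) (h2 : hi ≤ cs.length) :
    pvRF cs lo hi = -1 ∨ ((lo : Int) ≤ pvRF cs lo hi ∧ pvRF cs lo hi < (hi : Int)) := by
  rw [pvRF_eq cs lo hi h1 h2]
  have hlen : (List.drop lo (List.take hi cs)).length = hi - lo := by
    simp [List.length_drop, List.length_take]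
    omega
  rcases pvLS0_bound (List.drop lo (List.take hi cs)) (hi - lo + 1) with h | ⟨k, hk, hk1, hk2⟩
  · left; simp [h]
  · right
    rw [hlen] at hk2
    rw [hk, if_neg (by omega)]
    constructor <;> omega

-- splitting an rfind window at an interior point b: the search from a agrees with the
-- search from b unless the latter finds nothing, in which case the left part decides
lemma pvRF_split (cs : List Char) (a b c : Nat) (hab : a ≤ b) (hbc : b ≤ c) (hc : c ≤ cs.length) :
    pvRF cs a c = if pvRF cs b c = -1 then pvRF cs a b else pvRF cs b c := by
  induction c, hbc using Nat.le_induction with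
  | base => rw [pvRF_self cs b (by omega), if_pos rfl]
  | succ c hbc ih =>
    have hcl : c < cs.length := by omega
    rw [pvRF_succ cs a c (by omega) hcl, pvRF_succ cs b c hbc hcl]
    by_cases hsp : cs[c]? = some ' '
    · rw [if_pos hsp, if_pos hsp, if_neg (by omega)]
    · rw [if_neg hsp, if_neg hsp, ih (by omega)]

lemma pvRF_widen (cs : List Char) (a b c : Nat) (hab : a ≤ b) (hbc : b ≤ c) (hc : c ≤ cs.length)
    (hno : pvRF cs a b = -1) : pvRF cs a c = pvRF cs b c := by
  rw [pvRF_split cs a b c hab hbc hc]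
  split_ifs with h
  · rw [hno, h]
  · rfl

-- after the last space k of [a,c) there is no space: rfind over [k+1,c) is -1
lemma pvRF_after (cs : List Char) (a c k : Nat) (hac : a ≤ c) (hc : c ≤ cs.length)
    (hk : pvRF cs a c = (k : Int)) : pvRF cs (k + 1) c = -1 := by
  have hb := pvRF_bound cs a c hac hc
  rw [hk] at hb
  rcases hb with h | ⟨h1, h2⟩
  · omega
  have hk1 : k + 1 ≤ c := by omega
  have hs := pvRF_split cs a (k + 1) c (by omega) hk1 hc
  rw [hk] at hs
  by_contra hne
  rcases pvRF_bound cs (k + 1) c hk1 hc with h | ⟨h3, h4⟩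
  · exact hne h
  rw [if_neg hne] at hs
  omega

lemma pvMain (s : String) (w : Int) (hw : 1 ≤ w) :
    ∀ (rest : List Char) (i fuel start lo : Nat) (out : List String),
      s.toList.drop i = rest → start ≤ lo → lo ≤ i → (i : Int) ≤ (start : Int) + w →
      pvRF s.toList start lo = -1 →
      (s.toList.length : Int) - (start : Int) ≤ (fuel : Int) →
      pvFinA s (foldSoftPreserveLoop s w (PySem.List.enumerate rest (i : Int))
        (out, (start : Int), pvRF s.toList lo i))
        = pvFinB s (foldSoftPreserveAltLoop s w fuel (start : Int) out) := by
  intro rest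
  induction rest with
  | nil =>
    intro i fuel start lo out hdrop h1 h2 h3 hno h4
    have hn : s.toList.length ≤ i := List.drop_eq_nil_iff.mp hdrop
    simp only [PySem.List.enumerate_nil, foldSoftPreserveLoop]
    cases fuel with
    | zero => rfl
    | succ f =>
      simp only [foldSoftPreserveAltLoop]
      rw [PySem.Str.len_eq, if_neg (by omega)]
      rfl
  | cons c rest' ih =>
    intro i fuel start lo out hdrop h1 h2 h3 hno h4
    have hlt : i < s.toList.length := by
      by_contra h
      rw [List.drop_eq_nil_iff.mpr (by omega)] at hdrop
      exact absurd hdrop (by simp)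
    rw [List.drop_eq_getElem_cons hlt] at hdrop
    have hc : s.toList[i] = c := (List.cons.injEq _ _ _ _ ▸ hdrop).1
    have hrest : s.toList.drop (i + 1) = rest' := (List.cons.injEq _ _ _ _ ▸ hdrop).2
    have hls : (if c = ' ' then (i : Int) else pvRF s.toList lo i) = pvRF s.toList lo (i + 1) := by
      rw [pvRF_succ s.toList lo i h2 hlt]
      have hg : s.toList[i]? = some c := by rw [List.getElem?_eq_getElem hlt, hc]
      rw [hg]
      by_cases hcs : c = ' ' <;> simp [hcs]
    have e3 : (i : Int) + 1 = ((i + 1 : Nat) : Int) := by omega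
    rw [PySem.List.enumerate_cons]
    simp only [foldSoftPreserveLoop]
    rw [hls]
    by_cases htrig : w ≤ (i : Int) - (start : Int)
    · have hieq : (i : Int) = (start : Int) + w := by omega
      cases fuel with
      | zero => exfalso; omega
      | succ f =>
        rw [if_pos htrig]
        simp only [foldSoftPreserveAltLoop]
        rw [PySem.Str.len_eq, if_pos (show (start : Int) + w < (s.toList.length : Int) by omega)]
        have e2' : (start : Int) + w + 1 = ((i + 1 : Nat) : Int) := by push_cast; omega
        have hsp : (" ".toList) = [' '] := by decide
        have heq : pvRF s.toList start (i + 1) = pvRF s.toList lo (i + 1) :=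
          pvRF_widen s.toList start lo (i + 1) h1 (by omega) (by omega) hno
        have hj : PySem.Str.rfindFrom s " " (start : Int) (some ((start : Int) + w + 1))
            = pvRF s.toList lo (i + 1) := by
          rw [PySem.Str.rfindFrom_eq, hsp, e2']
          exact heq
        rw [hj]
        have hself : (-1 : Int) = pvRF s.toList (i + 1) (i + 1) :=
          (pvRF_self s.toList (i + 1) (by omega)).symm
        by_cases hcmp : (start : Int) < pvRF s.toList lo (i + 1)
        · rcases pvRF_bound s.toList lo (i + 1) (by omega) (by omega) with hbnd | ⟨hb1, hb2⟩
          · rw [hbnd] at hcmp; omega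
          · obtain ⟨k, hkeq⟩ : ∃ k : Nat, pvRF s.toList lo (i + 1) = (k : Int) :=
              ⟨(pvRF s.toList lo (i + 1)).toNat, by omega⟩
            have hno' : pvRF s.toList (k + 1) (i + 1) = -1 :=
              pvRF_after s.toList lo (i + 1) k (by omega) (by omega) hkeq
            rw [if_pos hcmp, if_pos hcmp, hself, hkeq]
            have e1 : (k : Int) + 1 = ((k + 1 : Nat) : Int) := by push_cast; ring
            rw [e1, e3]
            refine ih (i + 1) f (k + 1) (i + 1) _ hrest ?_ le_rfl ?_ hno' ?_
            · rw [hkeq] at hb2; push_cast at hb2; omega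
            · rw [hkeq] at hcmp; push_cast; omega
            · rw [hkeq] at hcmp; push_cast; push_cast at h4; omega
        · have hnsp : s.toList[i]? ≠ some ' ' := by
            intro hgs
            have := pvRF_succ s.toList lo i h2 hlt
            rw [if_pos hgs] at this
            rw [this] at hcmp
            omega
          have hno' : pvRF s.toList i (i + 1) = -1 := by
            rw [pvRF_succ s.toList i i le_rfl hlt, if_neg hnsp]
            exact pvRF_self s.toList i (by omega)
          rw [if_neg hcmp, if_neg hcmp, hself]
          have e2 : (start : Int) + w = ((i : Nat) : Int) := by omega
          rw [e2, e3]
          refine ih (i + 1) f i (i + 1) _ hrest (by omega) le_rfl (by push_cast; omega) hno' ?_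
          push_cast at h4 ⊢; omega
    · rw [if_neg htrig, e3]
      exact ih (i + 1) fuel start lo out hrest h1 (by omega) (by omega) hno h4

-- ===== VERDICT (by name: the statement is the Claim_ definition above) =====
theorem foldSoftPreserve_spec : Claim_equal_foldSoftPreserve := by
  intro s w _hdom hpre
  unfold Spec_foldSoftPreserve
  unfold Pre_foldSoftPreserve at hpre
  have h0 : pvRF s.toList 0 0 = -1 := pvRF_self s.toList 0 (Nat.zero_le _)
  have hmain := pvMain s w hpre s.toList 0 (s.toList.length + 1) 0 0 []
    (by simp) le_rfl le_rfl (by omega) h0 (by omega)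
  rw [h0] at hmain
  simp only [Nat.cast_zero] at hmain
  have ha : foldSoftPreserve s w
      = pvFinA s (foldSoftPreserveLoop s w (PySem.List.enumerate s.toList) ([], 0, -1)) := rfl
  have hb : foldSoftPreserve_alt s w
      = pvFinB s (foldSoftPreserveAltLoop s w (s.toList.length + 1) 0 []) := by
    unfold foldSoftPreserve_alt
    rw [if_neg (by omega)]
    rfl
  rw [ha, hb]
  exact hmain
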